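-- pv_equiv track=rewrite | github.com/towd47/advent_of_code | 2024/22.py | genDiffMap
-- ===== SOURCE A (Python) =====
-- def nextSecret(secret):
--     secret = (secret ^ (secret * 64)) % 16777216
--     secret = (secret ^ (secret // 32)) % 16777216
--     secret = (secret ^ (secret * 2048)) % 16777216
--     return secret
--
-- def genDiffMap(secret, n):
--     diffs = []
--     diffMap = {}
--     for i in range(n):
--         s = secret
--         s1 = nextSecret(secret)
--         diffs.append(s1 % 10 - s % 10)
--         if len(diffs) == 4:
--             diffTup = tuple(diffs)
--             if diffTup not in diffMap:
--                 diffMap[diffTup] = s1 % 10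
--             diffs.pop(0)
--         secret = s1
--     return diffMap
-- ===== SOURCE B (Python) =====
-- def nextSecret(secret):
--     secret = (secret ^ (secret * 64)) % 16777216
--     secret = (secret ^ (secret // 32)) % 16777216
--     secret = (secret ^ (secret * 2048)) % 16777216
--     return secret
--
-- def genDiffMap(secret, n):
--     # Pass 1: generate all n+1 prices up front.
--     prices = [secret % 10]
--     s = secret
--     for _ in range(n):
--         s = nextSecret(s)
--         prices.append(s % 10)
--     # Pass 2: consecutive differences, then 4-windows paired with the price
--     # that follows each window; first occurrence of a window wins.
--     diffs = [q - p for p, q in zip(prices, prices[1:])]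
--     diffMap = {}
--     for tup, price in zip(zip(diffs, diffs[1:], diffs[2:], diffs[3:]), prices[4:]):
--         if tup not in diffMap:
--             diffMap[tup] = price
--     return diffMap
-- ===== Notes on version B (the rewrite author's own statement) =====
-- stated objective: alternative
-- what changed: Replaces the single interleaved loop that maintains a mutable 4-element sliding window and pops its front with two separate passes: first build the full prices list, then derive diffs and 4-windows by zipping shifted lists and fold them into the dict.
import Mathlib
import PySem

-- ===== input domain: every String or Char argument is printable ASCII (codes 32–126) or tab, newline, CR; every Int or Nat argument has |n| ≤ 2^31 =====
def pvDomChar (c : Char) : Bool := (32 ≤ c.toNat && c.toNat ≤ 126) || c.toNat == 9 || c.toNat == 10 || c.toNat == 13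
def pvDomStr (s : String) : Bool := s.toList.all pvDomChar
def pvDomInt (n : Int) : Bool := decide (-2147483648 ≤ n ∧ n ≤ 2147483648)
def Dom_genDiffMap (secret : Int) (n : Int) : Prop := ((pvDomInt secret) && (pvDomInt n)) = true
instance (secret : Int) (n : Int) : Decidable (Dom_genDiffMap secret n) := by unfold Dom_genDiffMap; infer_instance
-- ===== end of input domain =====

-- B replaces A's single loop with a mutable 4-element sliding window by two passes
-- (build the prices list, then zip shifted lists into diffs/windows); alternative
-- decomposition, same O(n) cost. The returned dict is serialized as flattened
-- (d1,d2,d3,d4,price) tuples in insertion order.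

-- ===== PORT A =====
def nextSecretP (secret : Int) : Int :=
  let s1 := PySem.Int.mod (PySem.Int.bxor secret (secret * 64)) 16777216
  let s2 := PySem.Int.mod (PySem.Int.bxor s1 (PySem.Int.floordiv s1 32)) 16777216
  PySem.Int.mod (PySem.Int.bxor s2 (s2 * 2048)) 16777216

-- one iteration of A's for-loop over state (diffs, diffMap, secret)
def stepA (st : List Int × PySem.Dict (Int × Int × Int × Int) Int × Int) :
    List Int × PySem.Dict (Int × Int × Int × Int) Int × Int :=
  let s := st.2.2
  let s1 := nextSecretP s
  let diffs := st.1 ++ [PySem.Int.mod s1 10 - PySem.Int.mod s 10]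
  if diffs.length == 4 then
    match diffs with
    | [a, b, c, d] =>
      let key := (a, b, c, d)
      let dm := if ! st.2.1.contains key then st.2.1.insert key (PySem.Int.mod s1 10) else st.2.1
      ([b, c, d], dm, s1)   -- diffs.pop(0)
    | _ => (diffs, st.2.1, s1)  -- unreachable: length is 4
  else (diffs, st.2.1, s1)

def genDiffMap (secret : Int) (n : Int) : List (Int × Int × Int × Int × Int) :=
  let st := (PySem.List.pyRange 0 n 1).foldl (fun st _ => stepA st)
    (([] : List Int), (PySem.Dict.empty : PySem.Dict (Int × Int × Int × Int) Int), secret)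
  st.2.1.items.map (fun kv => (kv.1.1, kv.1.2.1, kv.1.2.2.1, kv.1.2.2.2, kv.2))

-- ===== PORT B =====
-- one iteration of B's price-generation loop over state (s, prices)
def stepP (st : Int × List Int) : Int × List Int :=
  let s := nextSecretP st.1
  (s, st.2 ++ [PySem.Int.mod s 10])

def genDiffMap_alt (secret : Int) (n : Int) : List (Int × Int × Int × Int × Int) :=
  let pr := (PySem.List.pyRange 0 n 1).foldl (fun st _ => stepP st)
    (secret, [PySem.Int.mod secret 10])
  let prices := pr.2
  let diffs := (prices.zip (prices.drop 1)).map (fun pq => pq.2 - pq.1)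
  let windows := ((diffs.zip (diffs.drop 1)).zip ((diffs.drop 2).zip (diffs.drop 3))).map
    (fun x => (x.1.1, x.1.2, x.2.1, x.2.2))
  let dm := (windows.zip (prices.drop 4)).foldl
    (fun (dm : PySem.Dict (Int × Int × Int × Int) Int) kv =>
      if ! dm.contains kv.1 then dm.insert kv.1 kv.2 else dm)
    PySem.Dict.empty
  dm.items.map (fun kv => (kv.1.1, kv.1.2.1, kv.1.2.2.1, kv.1.2.2.2, kv.2))

-- ===== PRECONDITION & SPEC =====
def Spec_genDiffMap (secret : Int) (n : Int) (out : List (Int × Int × Int × Int × Int)) : Prop := out = genDiffMap_alt secret n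
instance (secret : Int) (n : Int) (out : List (Int × Int × Int × Int × Int)) : Decidable (Spec_genDiffMap secret n out) := by unfold Spec_genDiffMap; infer_instance

-- ===== CLAIM (what is proved, stated in full; the proofs are below) =====
def Claim_equal_genDiffMap : Prop := ∀ (secret : Int) (n : Int), Dom_genDiffMap secret n → Spec_genDiffMap secret n (genDiffMap secret n)

-- ===== LEMMAS AND PROOFS =====

-- the k-th secret, its price, the k-th diff, and the (window, price) pair of window j
def iterS (secret : Int) (k : Nat) : Int := nextSecretP^[k] secret
def priceS (secret : Int) (k : Nat) : Int := PySem.Int.mod (iterS secret k) 10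
def diffS (secret : Int) (k : Nat) : Int := priceS secret (k + 1) - priceS secret k
def winPair (secret : Int) (j : Nat) : (Int × Int × Int × Int) × Int :=
  ((diffS secret j, diffS secret (j + 1), diffS secret (j + 2), diffS secret (j + 3)),
   priceS secret (j + 4))
def mkDict (secret : Int) (m : Nat) : PySem.Dict (Int × Int × Int × Int) Int :=
  ((List.range m).map (winPair secret)).foldl
    (fun dm kv => if ! dm.contains kv.1 then dm.insert kv.1 kv.2 else dm)
    PySem.Dict.empty

theorem foldl_const {α β : Type} (l : List α) (g : β → β) (init : β) :
    l.foldl (fun st _ => g st) init = g^[l.length] init := by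
  induction l generalizing init with
  | nil => rfl
  | cons x xs ih => simp [List.foldl, ih, Function.iterate_succ_apply]

theorem stepA_iter (secret : Int) (k : Nat) :
    stepA^[k] (([] : List Int), (PySem.Dict.empty : PySem.Dict (Int × Int × Int × Int) Int), secret)
      = ((List.range' (k - 3) (min k 3)).map (diffS secret), mkDict secret (k - 3), iterS secret k) := by
  induction k with
  | zero => simp [iterS, mkDict]
  | succ k ih =>
    rw [Function.iterate_succ_apply', ih]
    have hs1 : nextSecretP (iterS secret k) = iterS secret (k + 1) := by
      simp [iterS, Function.iterate_succ_apply']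
    have hd : PySem.Int.mod (nextSecretP (iterS secret k)) 10 - PySem.Int.mod (iterS secret k) 10
        = diffS secret k := by rw [hs1]; rfl
    by_cases hk : k < 3
    · have hmin : min k 3 = k := by omega
      have hsub : k - 3 = 0 := by omega
      have hsub' : k + 1 - 3 = 0 := by omega
      have hmin' : min (k + 1) 3 = k + 1 := by omega
      have hcat : (List.range' 0 k).map (diffS secret) ++ [diffS secret k]
          = (List.range' 0 (k + 1)).map (diffS secret) := by
        rw [List.range'_concat]
        simp
      have hd2 : PySem.Int.mod (iterS secret (k + 1)) 10 - PySem.Int.mod (iterS secret k) 10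
          = diffS secret k := rfl
      simp only [stepA, hmin, hsub, hsub', hmin', hs1, hd2, hcat]
      have hne : (((List.range' 0 (k + 1)).map (diffS secret)).length == 4) = false := by
        simp
        omega
      simp only [hne, Bool.false_eq_true, if_false]
    · obtain ⟨m, rfl⟩ : ∃ m, k = m + 3 := ⟨k - 3, by omega⟩
      have hmin : min (m + 3) 3 = 3 := by omega
      have hsub : m + 3 - 3 = m := by omega
      have hsub' : m + 3 + 1 - 3 = m + 1 := by omega
      have hmin' : min (m + 3 + 1) 3 = 3 := by omega
      have hr : List.range' m 3 = [m, m + 1, m + 2] := by simp [List.range'_succ]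
      have hr' : List.range' (m + 1) 3 = [m + 1, m + 2, m + 3] := by simp [List.range'_succ]
      have hd' : PySem.Int.mod (iterS secret (m + 3 + 1)) 10 - PySem.Int.mod (iterS secret (m + 3)) 10
          = diffS secret (m + 3) := rfl
      have hp : PySem.Int.mod (iterS secret (m + 3 + 1)) 10 = priceS secret (m + 4) := rfl
      have hd2 : priceS secret (m + 4) - PySem.Int.mod (iterS secret (m + 3)) 10
          = diffS secret (m + 3) := rfl
      have hmk : (if ! (mkDict secret m).contains (diffS secret m, diffS secret (m + 1), diffS secret (m + 2), diffS secret (m + 3))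
          then (mkDict secret m).insert (diffS secret m, diffS secret (m + 1), diffS secret (m + 2), diffS secret (m + 3)) (priceS secret (m + 4))
          else mkDict secret m) = mkDict secret (m + 1) := by
        simp only [mkDict, List.range_succ, List.map_append, List.foldl_append]
        rfl
      simp only [stepA, hmin, hsub, hsub', hmin', hr, hr', hs1, hp, hd2, List.map_cons,
        List.map_nil, List.cons_append, List.nil_append, List.length_cons, List.length_nil,
        Nat.reduceAdd, Nat.reduceBEq, reduceIte]
      rw [hmk]

theorem stepP_iter (secret : Int) (k : Nat) :
    stepP^[k] (secret, [PySem.Int.mod secret 10])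
      = (iterS secret k, (List.range (k + 1)).map (priceS secret)) := by
  induction k with
  | zero => simp [iterS, priceS, List.range_succ]
  | succ k ih =>
    rw [Function.iterate_succ_apply', ih]
    have hs1 : nextSecretP (iterS secret k) = iterS secret (k + 1) := by
      simp [iterS, Function.iterate_succ_apply']
    simp only [stepP, hs1]
    rw [List.range_succ (n := k + 1), List.map_append]
    rfl

theorem pairs_eq (f : Nat → Int) (m : Nat) (P D : List Int)
    (hP : P = (List.range (m + 1)).map f)
    (hD : D = (P.zip (P.drop 1)).map (fun pq => pq.2 - pq.1)) :
    (((D.zip (D.drop 1)).zip ((D.drop 2).zip (D.drop 3))).map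
        (fun x => (x.1.1, x.1.2, x.2.1, x.2.2))).zip (P.drop 4)
      = (List.range (m - 3)).map
          (fun j => ((f (j + 1) - f j, f (j + 2) - f (j + 1), f (j + 3) - f (j + 2), f (j + 4) - f (j + 3)), f (j + 4))) := by
  subst hD hP
  apply List.ext_getElem
  · simp
    omega
  · intro i h1 h2
    simp [List.getElem_zip, List.getElem_drop, List.getElem_map, List.getElem_range,
      Nat.add_comm, Nat.add_left_comm]

-- ===== VERDICT (by name: the statement is the Claim_ definition above) =====
theorem genDiffMap_spec : Claim_equal_genDiffMap := by
  intro secret n _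
  show genDiffMap secret n = genDiffMap_alt secret n
  unfold genDiffMap genDiffMap_alt
  rw [foldl_const, foldl_const, PySem.List.length_pyRange_one]
  rw [stepA_iter, stepP_iter]
  dsimp only
  rw [pairs_eq (priceS secret) (n - 0).toNat _ _ rfl rfl]
  rfl
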